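-- pv_equiv track=rewrite | github.com/MichaelRipa/countermoral | src/utils/triplet_generator.py | generate_triplets
-- ===== SOURCE A (Python) =====
-- def generate_triplets(attr_1 : list,attr_2 : list,attr_3 : list, n : int):
--
--     triplets = []
--     tally = 0
--     for i in range(len(attr_1)):
--         ai = attr_1[i]
--         for j in range(len(attr_2)):
--             aj = attr_2[j]
--             for k in range(len(attr_3)):
--                 ak = attr_3[k]
--                 triplets.append([ai,aj,ak])
--                 tally += 1
--                 if tally == n:
--                     return triplets
--
--     return triplets
-- ===== SOURCE B (Python) =====
-- def generate_triplets(attr_1 : list, attr_2 : list, attr_3 : list, n : int):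
--     L2, L3 = len(attr_2), len(attr_3)
--     total = len(attr_1) * L2 * L3
--     count = total if (n <= 0 or n > total) else n
--     block = L2 * L3
--     out = []
--     for idx in range(count):
--         i, rem = divmod(idx, block)
--         j, k = divmod(rem, L3)
--         out.append([attr_1[i], attr_2[j], attr_3[k]])
--     return out
-- ===== Notes on version B (the rewrite author's own statement) =====
-- stated objective: alternative
-- what changed: Replaces the three nested loops with a tally and an early return by a single pass over one flat index range of the exact output length, recovering the three coordinates by divmod.
import Mathlib
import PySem

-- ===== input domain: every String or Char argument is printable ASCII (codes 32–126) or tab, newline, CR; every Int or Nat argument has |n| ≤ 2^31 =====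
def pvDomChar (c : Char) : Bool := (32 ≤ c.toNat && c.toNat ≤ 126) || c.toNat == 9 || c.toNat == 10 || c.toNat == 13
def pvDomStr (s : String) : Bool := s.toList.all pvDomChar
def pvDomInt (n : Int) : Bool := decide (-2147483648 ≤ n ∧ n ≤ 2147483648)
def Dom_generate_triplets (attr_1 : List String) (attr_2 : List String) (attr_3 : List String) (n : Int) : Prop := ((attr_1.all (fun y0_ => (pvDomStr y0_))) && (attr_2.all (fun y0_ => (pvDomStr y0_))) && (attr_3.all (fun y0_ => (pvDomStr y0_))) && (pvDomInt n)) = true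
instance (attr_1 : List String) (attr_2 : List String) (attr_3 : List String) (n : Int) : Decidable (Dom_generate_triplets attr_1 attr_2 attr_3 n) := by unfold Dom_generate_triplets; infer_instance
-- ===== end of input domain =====

-- B replaces A's three nested loops with tally and early return by a single pass over one
-- flat index range of the exact output length, recovering the three coordinates by divmod
-- (objective: alternative; same asymptotic cost).


-- ===== PORT A =====
-- the three nested loops; .inr = A's early 'return triplets', .inl = fall through with the updated (triplets, tally)
def gtLoop3 (n : Int) (ai aj : String) : List String → List (List String) → Int → (List (List String) × Int) ⊕ (List (List String))
  | [], trip, tally => .inl (trip, tally)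
  | ak :: rest, trip, tally =>
      let trip' := trip ++ [[ai, aj, ak]]
      let tally' := tally + 1
      if tally' = n then .inr trip' else gtLoop3 n ai aj rest trip' tally'

def gtLoop2 (n : Int) (ai : String) (attr_3 : List String) : List String → List (List String) → Int → (List (List String) × Int) ⊕ (List (List String))
  | [], trip, tally => .inl (trip, tally)
  | aj :: rest, trip, tally =>
      match gtLoop3 n ai aj attr_3 trip tally with
      | .inr t => .inr t
      | .inl (trip', tally') => gtLoop2 n ai attr_3 rest trip' tally'

def gtLoop1 (n : Int) (attr_2 attr_3 : List String) : List String → List (List String) → Int → (List (List String) × Int) ⊕ (List (List String))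
  | [], trip, tally => .inl (trip, tally)
  | ai :: rest, trip, tally =>
      match gtLoop2 n ai attr_3 attr_2 trip tally with
      | .inr t => .inr t
      | .inl (trip', tally') => gtLoop1 n attr_2 attr_3 rest trip' tally'

def generate_triplets (attr_1 : List String) (attr_2 : List String) (attr_3 : List String) (n : Int) : List (List String) :=
  match gtLoop1 n attr_2 attr_3 attr_1 [] 0 with
  | .inl (trip, _) => trip
  | .inr trip => trip


-- ===== PORT B =====
-- indices produced by the divmods are always in range, so pyGetD's default is never used
def generate_triplets_alt (attr_1 : List String) (attr_2 : List String) (attr_3 : List String) (n : Int) : List (List String) :=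
  let L2 : Int := attr_2.length
  let L3 : Int := attr_3.length
  let total : Int := (attr_1.length : Int) * L2 * L3
  let count : Int := if n ≤ 0 ∨ total < n then total else n
  let block : Int := L2 * L3
  (PySem.List.pyRange 0 count 1).map (fun idx =>
    let i := PySem.Int.floordiv idx block
    let rem := PySem.Int.mod idx block
    let j := PySem.Int.floordiv rem L3
    let k := PySem.Int.mod rem L3
    [PySem.List.pyGetD attr_1 i "", PySem.List.pyGetD attr_2 j "", PySem.List.pyGetD attr_3 k ""])


-- ===== PRECONDITION & SPEC =====
def Spec_generate_triplets (attr_1 : List String) (attr_2 : List String) (attr_3 : List String) (n : Int) (out : List (List String)) : Prop := out = generate_triplets_alt attr_1 attr_2 attr_3 n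
instance (attr_1 : List String) (attr_2 : List String) (attr_3 : List String) (n : Int) (out : List (List String)) : Decidable (Spec_generate_triplets attr_1 attr_2 attr_3 n out) := by unfold Spec_generate_triplets; infer_instance

-- ===== CLAIM (what is proved, stated in full; the proofs are below) =====
def Claim_equal_generate_triplets : Prop := ∀ (attr_1 : List String) (attr_2 : List String) (attr_3 : List String) (n : Int), Dom_generate_triplets attr_1 attr_2 attr_3 n → Spec_generate_triplets attr_1 attr_2 attr_3 n (generate_triplets attr_1 attr_2 attr_3 n)

-- ===== LEMMAS AND PROOFS =====

-- the full Cartesian product, in A's traversal order; both ports are proved equal to a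
-- truncation of it
def gtProd (a1 a2 a3 : List String) : List (List String) :=
  a1.flatMap (fun a => a2.flatMap (fun b => a3.map (fun c => [a, b, c])))

-- the state an A-loop reaches after appending a batch E of triplets: either the early return or the fall-through state
def ifForm (n : Int) (trip E : List (List String)) : (List (List String) × Int) ⊕ (List (List String)) :=
  if (trip.length : Int) < n ∧ n ≤ (trip.length : Int) + E.length
  then .inr (trip ++ E.take (n - trip.length).toNat)
  else .inl (trip ++ E, ((trip.length : Int) + E.length))

theorem ifForm_append (n : Int) (trip e E' : List (List String)) :
    ifForm n trip (e ++ E') =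
      match ifForm n trip e with
      | .inr t => .inr t
      | .inl (t', _) => ifForm n t' E' := by
  by_cases h1 : (trip.length : Int) < n ∧ n ≤ (trip.length : Int) + e.length
  · have he : ifForm n trip e = .inr (trip ++ e.take (n - (trip.length : Int)).toNat) := by
      unfold ifForm; rw [if_pos h1]
    rw [he]
    unfold ifForm
    rw [if_pos (show (trip.length : Int) < n ∧ n ≤ (trip.length : Int) + (e ++ E').length by
      simp only [List.length_append]; push_cast; omega)]
    have hk : (n - (trip.length : Int)).toNat ≤ e.length := by omega
    rw [List.take_append, Nat.sub_eq_zero_of_le hk, List.take_zero, List.append_nil]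
  · have he : ifForm n trip e = .inl (trip ++ e, (trip.length : Int) + e.length) := by
      unfold ifForm; rw [if_neg h1]
    rw [he]
    show ifForm n trip (e ++ E') = ifForm n (trip ++ e) E'
    have hlen : (((trip ++ e).length : Nat) : Int) = (trip.length : Int) + e.length := by
      push_cast [List.length_append]; ring
    unfold ifForm
    by_cases h2 : ((trip ++ e).length : Int) < n ∧ n ≤ ((trip ++ e).length : Int) + E'.length
    · rw [if_pos h2, if_pos (show (trip.length : Int) < n ∧ n ≤ (trip.length : Int) + (e ++ E').length by
        rw [hlen] at h2; simp only [List.length_append]; push_cast; omega)]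
      have hge : e.length ≤ (n - (trip.length : Int)).toNat := by rw [hlen] at h2; omega
      have hidx : (n - (((trip ++ e).length : Nat) : Int)).toNat = (n - (trip.length : Int)).toNat - e.length := by
        rw [hlen]; omega
      rw [List.take_append, List.take_of_length_le hge, List.append_assoc, hidx]
    · rw [if_neg h2, if_neg (show ¬ ((trip.length : Int) < n ∧ n ≤ (trip.length : Int) + (e ++ E').length) by
        rw [hlen] at h2; simp only [List.length_append]; push_cast; omega)]
      simp only [Sum.inl.injEq, Prod.mk.injEq, List.append_assoc, List.length_append]
      refine ⟨trivial, by push_cast; omega⟩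

theorem ifForm_inl (n : Int) (trip E t' : List (List String)) (y : Int)
    (h : ifForm n trip E = .inl (t', y)) : t' = trip ++ E ∧ y = (t'.length : Int) := by
  unfold ifForm at h
  split_ifs at h
  simp only [Sum.inl.injEq, Prod.mk.injEq] at h
  obtain ⟨h1, h2⟩ := h
  subst h1; subst h2
  exact ⟨rfl, by push_cast [List.length_append]; ring⟩

theorem gtLoop3_spec (n : Int) (ai aj : String) (l : List String) (trip : List (List String)) :
    gtLoop3 n ai aj l trip (trip.length : Int) =
      ifForm n trip (l.map (fun c => [ai, aj, c])) := by
  induction l generalizing trip with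
  | nil =>
    simp only [gtLoop3, List.map_nil, ifForm, List.length_nil]
    rw [if_neg (by push_cast; omega)]
    simp
  | cons ak rest ih =>
    rw [List.map_cons, show ([ai, aj, ak] :: rest.map (fun c => [ai, aj, c])) =
        [[ai, aj, ak]] ++ rest.map (fun c => [ai, aj, c]) from rfl, ifForm_append]
    simp only [gtLoop3]
    by_cases h : (trip.length : Int) + 1 = n
    · rw [if_pos h]
      have he : ifForm n trip [[ai, aj, ak]] = .inr (trip ++ [[ai, aj, ak]]) := by
        unfold ifForm
        rw [if_pos (by simp only [List.length_cons, List.length_nil]; push_cast; omega)]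
        have h1 : (n - (trip.length : Int)).toNat = 1 := by omega
        rw [h1]
        rfl
      rw [he]
    · rw [if_neg h]
      have he : ifForm n trip [[ai, aj, ak]] = .inl (trip ++ [[ai, aj, ak]], (trip.length : Int) + ([[ai, aj, ak]] : List (List String)).length) := by
        unfold ifForm; rw [if_neg (by simp only [List.length_cons, List.length_nil]; push_cast; omega)]
      rw [he]
      show gtLoop3 n ai aj rest (trip ++ [[ai, aj, ak]]) ((trip.length : Int) + 1) =
        ifForm n (trip ++ [[ai, aj, ak]]) (rest.map (fun c => [ai, aj, c]))
      have hlen : (trip.length : Int) + 1 = (((trip ++ [[ai, aj, ak]]).length : Nat) : Int) := by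
        push_cast [List.length_append, List.length_cons, List.length_nil]; omega
      rw [hlen, ih]

theorem gtLoop2_spec (n : Int) (ai : String) (a3 : List String) (l : List String) (trip : List (List String)) :
    gtLoop2 n ai a3 l trip (trip.length : Int) =
      ifForm n trip (l.flatMap (fun b => a3.map (fun c => [ai, b, c]))) := by
  induction l generalizing trip with
  | nil =>
    simp only [gtLoop2, List.flatMap_nil, ifForm, List.length_nil]
    rw [if_neg (by push_cast; omega)]
    simp
  | cons b rest ih =>
    rw [List.flatMap_cons, ifForm_append]
    simp only [gtLoop2, gtLoop3_spec]
    rcases hres : ifForm n trip (a3.map fun c => [ai, b, c]) with ⟨t', y⟩ | t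
    · obtain ⟨ht, hy⟩ := ifForm_inl n trip _ t' y hres
      rw [hy]
      exact ih t'
    · rfl

theorem gtLoop1_spec (n : Int) (a2 a3 : List String) (l : List String) (trip : List (List String)) :
    gtLoop1 n a2 a3 l trip (trip.length : Int) =
      ifForm n trip (gtProd l a2 a3) := by
  induction l generalizing trip with
  | nil =>
    simp only [gtLoop1, gtProd, List.flatMap_nil, ifForm, List.length_nil]
    rw [if_neg (by push_cast; omega)]
    simp
  | cons ai rest ih =>
    rw [gtProd, List.flatMap_cons, ifForm_append]
    simp only [gtLoop1, gtLoop2_spec]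
    rcases hres : ifForm n trip (a2.flatMap fun b => a3.map fun c => [ai, b, c]) with ⟨t', y⟩ | t
    · obtain ⟨ht, hy⟩ := ifForm_inl n trip _ t' y hres
      rw [hy]
      exact ih t'
    · rfl

theorem generate_triplets_eq_take (a1 a2 a3 : List String) (n : Int) :
    generate_triplets a1 a2 a3 n =
      (if 0 < n ∧ n ≤ ((gtProd a1 a2 a3).length : Int)
       then (gtProd a1 a2 a3).take n.toNat
       else gtProd a1 a2 a3) := by
  unfold generate_triplets
  have h0 : (0 : Int) = (([] : List (List String)).length : Int) := by simp
  rw [h0, gtLoop1_spec n a2 a3 a1 []]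
  unfold ifForm
  simp only [List.length_nil, Nat.cast_zero, Int.zero_add, List.nil_append, Int.sub_zero]
  split_ifs with h
  · rfl
  · rfl

theorem gtProd_length (a1 a2 a3 : List String) :
    (gtProd a1 a2 a3).length = a1.length * (a2.length * a3.length) := by
  induction a1 with
  | nil => simp [gtProd]
  | cons a t ih =>
    simp only [gtProd, List.flatMap_cons, List.length_append] at *
    rw [ih]
    simp [List.length_flatMap, Nat.succ_mul]
    omega

theorem range_map_getD {γ : Type} (l : List γ) (d : γ) (m : Nat) (hm : m ≤ l.length) :
    (List.range m).map (fun k => l.getD k d) = l.take m := by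
  apply List.ext_getElem
  · simp [Nat.min_eq_left hm]
  · intro i h1 h2
    simp at h1 ⊢
    rw [List.getElem?_eq_getElem (by omega)]
    simp

theorem flatMap_getD {α β : Type} (xs : List α) (h : α → List β) (m : Nat)
    (hm : ∀ a, (h a).length = m) (k : Nat) (hk : k < xs.length * m) (d : β) (da : α) :
    (xs.flatMap h).getD k d = (h (xs.getD (k / m) da)).getD (k % m) d := by
  induction xs generalizing k with
  | nil => simp at hk
  | cons a t ih =>
    simp only [List.flatMap_cons]
    by_cases hkm : k < m
    · rw [Nat.div_eq_of_lt hkm, Nat.mod_eq_of_lt hkm]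
      simp only [List.getD, List.getElem?_append_left (by rw [hm a]; exact hkm)]
      rfl
    · push Not at hkm
      have hm0 : 0 < m := Nat.pos_of_ne_zero (by rintro rfl; simp at hk)
      have hlt : k - m < t.length * m := by
        have : k < t.length * m + m := by
          simpa [List.length_cons, Nat.add_mul] using hk
        omega
      have hcast : (h a ++ t.flatMap h).getD k d = (t.flatMap h).getD (k - m) d := by
        simp only [List.getD]
        rw [List.getElem?_append_right (by rw [hm a]; exact hkm), hm a]
      rw [hcast, ih (k - m) hlt]
      have h1 : k / m = (k - m) / m + 1 := Nat.div_eq_sub_div hm0 hkm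
      have h2 : (k - m) % m = k % m := by
        conv_rhs => rw [← Nat.sub_add_cancel hkm]
        rw [Nat.add_mod_right]
      rw [h1, h2, List.getD_cons_succ]

theorem inner_length (ys zs : List String) (g : String → String → List String) :
    (ys.flatMap (fun b => zs.map (g b))).length = ys.length * zs.length := by
  simp [List.length_flatMap, List.map_const', List.sum_replicate, smul_eq_mul]

theorem gtProd_getD (a1 a2 a3 : List String) (k : Nat)
    (hk : k < a1.length * (a2.length * a3.length)) :
    (gtProd a1 a2 a3).getD k [] =
      [a1.getD (k / (a2.length * a3.length)) "",
       a2.getD (k % (a2.length * a3.length) / a3.length) "",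
       a3.getD (k % a3.length) ""] := by
  have hm0 : 0 < a2.length * a3.length := by
    rcases Nat.eq_zero_or_pos (a2.length * a3.length) with h | h
    · rw [h, Nat.mul_zero] at hk; omega
    · exact h
  have hL3 : 0 < a3.length := by
    rcases Nat.eq_zero_or_pos a3.length with h | h
    · rw [h, Nat.mul_zero] at hm0; omega
    · exact h
  rw [gtProd, flatMap_getD a1 _ (a2.length * a3.length)
        (fun a => inner_length a2 a3 (fun b c => [a, b, c])) k hk [] ""]
  rw [flatMap_getD a2 _ a3.length (fun b => by simp) (k % (a2.length * a3.length))
        (Nat.mod_lt _ hm0) [] ""]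
  rw [Nat.mod_mod_of_dvd k ⟨a2.length, Nat.mul_comm _ _⟩]
  have hk3 : k % a3.length < a3.length := Nat.mod_lt _ hL3
  simp [List.getD, List.getElem?_map, List.getElem?_eq_getElem hk3]

theorem generate_triplets_alt_eq_take (a1 a2 a3 : List String) (n : Int) :
    generate_triplets_alt a1 a2 a3 n =
      (if 0 < n ∧ n ≤ ((gtProd a1 a2 a3).length : Int)
       then (gtProd a1 a2 a3).take n.toNat
       else gtProd a1 a2 a3) := by
  have hPlen := gtProd_length a1 a2 a3
  have htot : ((a1.length : Int) * (a2.length : Int) * (a3.length : Int)) = ((gtProd a1 a2 a3).length : Int) := by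
    rw [hPlen]; push_cast; ring
  unfold generate_triplets_alt
  simp only [htot]
  set P := gtProd a1 a2 a3 with hP
  set c : Int := if n ≤ 0 ∨ (P.length : Int) < n then (P.length : Int) else n with hc
  have hc0 : 0 ≤ c := by rw [hc]; split_ifs <;> omega
  have hcle : c.toNat ≤ P.length := by rw [hc]; split_ifs <;> omega
  rw [PySem.List.pyRange_one, List.map_map]
  have hstep : ∀ f : Nat → List String,
      (∀ k, k < c.toNat → f k = P.getD k []) →
      (List.range (c - 0).toNat).map f = P.take c.toNat := by
    intro f hf
    rw [Int.sub_zero]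
    rw [List.map_congr_left (fun k hk => hf k (List.mem_range.mp hk))]
    exact range_map_getD P [] c.toNat hcle
  rw [hstep _ ?_]
  · rw [hc]; split_ifs with h1 h2 <;> first | omega | simp
  · intro k hk
    have hkP : k < P.length := lt_of_lt_of_le hk hcle
    have hkN : k < a1.length * (a2.length * a3.length) := by rw [← hPlen]; exact hkP
    have e2 : ((a2.length : Int) * (a3.length : Int)) = ((a2.length * a3.length : Nat) : Int) := by
      push_cast; ring
    simp only [Function.comp, Int.zero_add, e2, PySem.Int.floordiv_natCast,
      PySem.Int.mod_natCast, PySem.List.pyGetD_natCast,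
      Nat.mod_mod_of_dvd k ⟨a2.length, Nat.mul_comm _ _⟩]
    rw [gtProd_getD a1 a2 a3 k hkN]

-- ===== VERDICT (by name: the statement is the Claim_ definition above) =====
theorem generate_triplets_spec : Claim_equal_generate_triplets := by
  intro a1 a2 a3 n _
  unfold Spec_generate_triplets
  rw [generate_triplets_eq_take, generate_triplets_alt_eq_take]
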